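-- pv_equiv track=rewrite | github.com/Jamesprocode/FullPageJazzOMR | datasets/stacking.py | _strip_trailing_double_barlines
-- ===== SOURCE A (Python) =====
-- def _strip_trailing_double_barlines(tokens):
--     """Remove trailing double-barline (==) lines from a music token list.
--
--     Individual system files often close their last measure with == (a kern
--     final barline).  In a non-last stacked system this is misleading because
--     more music follows.
--     """
--     lines, cur = [], []
--     for tok in tokens:
--         cur.append(tok)
--         if tok == "<n>":
--             lines.append(cur)
--             cur = []
--     if cur:
--         lines.append(cur)
--
--     while lines:
--         content = [t for t in lines[-1] if t not in ("<t>", "<n>")]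
--         if content and all(t.startswith("==") for t in content):
--             lines.pop()
--         else:
--             break
--     return [t for line in lines for t in line]
-- ===== SOURCE B (Python) =====
-- def _line_start(tokens, j):
--     """Largest j' <= j with j' == 0 or tokens[j'-1] == "<n>"."""
--     while j > 0 and tokens[j - 1] != "<n>":
--         j -= 1
--     return j
--
--
-- def _strip_trailing_double_barlines(tokens):
--     """Remove trailing double-barline (==) lines from a music token list.
--
--     Backward scan maintaining only a cut index; never builds the kept lines.
--     """
--     cut = len(tokens)
--     while cut > 0:
--         j = _line_start(tokens, cut - 1)
--         content = [t for t in tokens[j:cut] if t not in ("<t>", "<n>")]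
--         if content and all(t.startswith("==") for t in content):
--             cut = j
--         else:
--             break
--     return tokens[:cut]
-- ===== Notes on version B (the rewrite author's own statement) =====
-- stated objective: alternative
-- what changed: A builds the token list into a list of lines, repeatedly pops trailing all-'==' lines, and re-flattens; B never materialises lines: it scans backward maintaining only a cut index (finding each trailing line's start by walking back to the previous '<n>') and returns tokens[:cut].
import Mathlib
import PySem

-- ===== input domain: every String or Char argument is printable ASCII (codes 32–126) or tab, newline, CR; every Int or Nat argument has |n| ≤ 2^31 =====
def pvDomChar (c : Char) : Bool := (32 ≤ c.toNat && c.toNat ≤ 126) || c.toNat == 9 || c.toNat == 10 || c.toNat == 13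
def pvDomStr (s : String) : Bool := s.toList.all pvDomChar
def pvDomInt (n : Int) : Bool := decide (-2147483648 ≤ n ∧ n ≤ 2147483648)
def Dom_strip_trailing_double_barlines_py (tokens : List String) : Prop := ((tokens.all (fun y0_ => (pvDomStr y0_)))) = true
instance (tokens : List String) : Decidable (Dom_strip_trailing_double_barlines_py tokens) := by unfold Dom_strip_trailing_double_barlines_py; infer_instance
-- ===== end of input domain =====

-- B replaces A's build-lines-then-pop-then-reflatten pipeline by a backward scan that
-- maintains only a cut index and returns tokens.take cut (objective: alternative).


-- ===== PORT A =====
-- the body of A's first for-loop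
def pvAStep (st : List (List String) × List String) (tok : String) : List (List String) × List String :=
  let cur := st.2 ++ [tok]
  if tok = "<n>" then (st.1 ++ [cur], ([] : List String)) else (st.1, cur)

-- A's first phase: group tokens into lines (cut after each "<n>"), plus trailing partial line
def pvASplit (tokens : List String) : List (List String) :=
  let p := tokens.foldl pvAStep ([], [])
  if p.2.isEmpty then p.1 else p.1 ++ [p.2]

-- [t for t in line if t not in ("<t>", "<n>")]
def pvAContent (line : List String) : List String :=
  line.filter (fun t => !(t == "<t>" || t == "<n>"))

-- the while-loop guard: content and all(t.startswith("==") for t in content)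
def pvABar (line : List String) : Bool :=
  !(pvAContent line).isEmpty && (pvAContent line).all (fun t => PySem.Str.startswith t "==")

-- A's while-loop: pop the last line while it is an all-double-barline line
def pvAWhile (lines : List (List String)) : List (List String) :=
  if h : lines = [] then []
  else if pvABar (lines.getLastD []) then pvAWhile lines.dropLast else lines
termination_by lines.length
decreasing_by
  have : 0 < lines.length := List.length_pos_iff.mpr h
  simp [List.length_dropLast]; omega

def strip_trailing_double_barlines_py (tokens : List String) : List String :=
  (pvAWhile (pvASplit tokens)).flatten    -- [t for line in lines for t in line]

-- ===== PORT B =====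
-- _line_start: while j > 0 and tokens[j-1] != "<n>": j -= 1   (tokens[j-1] is always in
-- range at B's call sites since j-1 < cut ≤ len(tokens), so getD is exact there)
def pvBLineStart (tokens : List String) : Nat → Nat
  | 0 => 0
  | j + 1 => if tokens.getD j "" = "<n>" then j + 1 else pvBLineStart tokens j

theorem pvBLineStart_le (tokens : List String) : ∀ j, pvBLineStart tokens j ≤ j := by
  intro j; induction j with
  | zero => simp [pvBLineStart]
  | succ j ih => simp only [pvBLineStart]; split <;> omega

-- B's while-loop over the cut index; tokens[j:cut] with 0 ≤ j ≤ cut ≤ len(tokens) is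
-- exactly (tokens.take cut).drop j
def pvBLoop (tokens : List String) : Nat → Nat
  | 0 => 0
  | cut + 1 =>
    let j := pvBLineStart tokens cut
    let content := ((tokens.take (cut + 1)).drop j).filter (fun t => !(t == "<t>" || t == "<n>"))
    if !content.isEmpty && content.all (fun t => PySem.Str.startswith t "==") then
      pvBLoop tokens j
    else cut + 1
termination_by cut => cut
decreasing_by exact Nat.lt_succ_of_le (pvBLineStart_le tokens cut)

-- tokens[:cut] with 0 ≤ cut ≤ len(tokens) is exactly tokens.take cut
def strip_trailing_double_barlines_py_alt (tokens : List String) : List String :=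
  tokens.take (pvBLoop tokens tokens.length)

-- ===== PRECONDITION & SPEC =====
def Spec_strip_trailing_double_barlines_py (tokens : List String) (out : List String) : Prop := out = strip_trailing_double_barlines_py_alt tokens
instance (tokens : List String) (out : List String) : Decidable (Spec_strip_trailing_double_barlines_py tokens out) := by unfold Spec_strip_trailing_double_barlines_py; infer_instance

-- ===== CLAIM (what is proved, stated in full; the proofs are below) =====
def Claim_equal_strip_trailing_double_barlines_py : Prop := ∀ (tokens : List String), Dom_strip_trailing_double_barlines_py tokens → Spec_strip_trailing_double_barlines_py tokens (strip_trailing_double_barlines_py tokens)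

-- ===== LEMMAS AND PROOFS =====

-- a list of tokens containing no "<n>"
def pvNoN (l : List String) : Prop := ∀ x ∈ l, x ≠ "<n>"

-- a completed line: nonempty, ends with "<n>", no other "<n>"
def pvFullLine (l : List String) : Prop := l ≠ [] ∧ l.getLast? = some "<n>" ∧ pvNoN l.dropLast

-- shape invariant of pvASplit's output
def pvGood (L : List (List String)) : Prop :=
  (∀ l ∈ L, l ≠ [] ∧ pvNoN l.dropLast) ∧ (∀ l ∈ L.dropLast, l.getLast? = some "<n>")

theorem pvFold_inv (ts : List String) : ∀ (lines : List (List String)) (cur : List String),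
    (∀ l ∈ lines, pvFullLine l) → pvNoN cur →
    (∀ l ∈ (ts.foldl pvAStep (lines, cur)).1, pvFullLine l) ∧
      pvNoN (ts.foldl pvAStep (lines, cur)).2 ∧
      (ts.foldl pvAStep (lines, cur)).1.flatten ++ (ts.foldl pvAStep (lines, cur)).2
        = lines.flatten ++ cur ++ ts := by
  induction ts with
  | nil => intro lines cur h1 h2; simpa using ⟨h1, h2⟩
  | cons t ts ih =>
    intro lines cur h1 h2
    simp only [List.foldl_cons]
    by_cases ht : t = "<n>"
    · subst ht
      have step : pvAStep (lines, cur) "<n>" = (lines ++ [cur ++ ["<n>"]], []) := by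
        simp [pvAStep]
      rw [step]
      have h1' : ∀ l ∈ lines ++ [cur ++ ["<n>"]], pvFullLine l := by
        intro l hl
        rcases List.mem_append.mp hl with h | h
        · exact h1 l h
        · simp only [List.mem_singleton] at h
          subst h
          refine ⟨by simp, by simp, by simpa [List.dropLast_concat] using h2⟩
      have h2' : pvNoN ([] : List String) := by intro x hx; simp at hx
      obtain ⟨a, b, c⟩ := ih (lines ++ [cur ++ ["<n>"]]) [] h1' h2'
      exact ⟨a, b, by rw [c]; simp⟩
    · have step : pvAStep (lines, cur) t = (lines, cur ++ [t]) := by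
        simp [pvAStep, ht]
      rw [step]
      have h2' : pvNoN (cur ++ [t]) := by
        intro x hx
        rcases List.mem_append.mp hx with h | h
        · exact h2 x h
        · simp only [List.mem_singleton] at h; subst h; exact ht
      obtain ⟨a, b, c⟩ := ih lines (cur ++ [t]) h1 h2'
      exact ⟨a, b, by rw [c]; simp⟩

theorem pvSplit_good (tokens : List String) :
    pvGood (pvASplit tokens) ∧ (pvASplit tokens).flatten = tokens := by
  obtain ⟨a, b, c⟩ := pvFold_inv tokens [] [] (by simp) (by intro x hx; simp at hx)
  simp only [List.flatten_nil, List.nil_append] at c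
  have hsplit : pvASplit tokens =
      if (tokens.foldl pvAStep ([], [])).2.isEmpty then (tokens.foldl pvAStep ([], [])).1
      else (tokens.foldl pvAStep ([], [])).1 ++ [(tokens.foldl pvAStep ([], [])).2] := rfl
  generalize hp : tokens.foldl pvAStep ([], []) = p at *
  obtain ⟨L, r⟩ := p
  simp only at a b c hsplit
  by_cases he : r = []
  · subst he
    rw [hsplit]; simp only [List.isEmpty_nil, if_true]
    simp only [List.append_nil] at c
    exact ⟨⟨fun l hl => ⟨(a l hl).1, (a l hl).2.2⟩,
      fun l hl => (a l (List.dropLast_sublist _ |>.mem hl)).2.1⟩, c⟩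
  · rw [hsplit]; simp only [List.isEmpty_iff, he, if_false]
    refine ⟨⟨?_, ?_⟩, by simpa using c⟩
    · intro l hl
      rcases List.mem_append.mp hl with h | h
      · exact ⟨(a l h).1, (a l h).2.2⟩
      · simp only [List.mem_singleton] at h; subst h
        exact ⟨he, fun x hx => b x (List.dropLast_sublist _ |>.mem hx)⟩
    · intro l hl
      rw [List.dropLast_concat] at hl
      exact (a l hl).2.1

theorem pvAWhile_nil : pvAWhile [] = [] := by rw [pvAWhile]; simp

theorem pvAWhile_concat (T : List (List String)) (l : List String) :
    pvAWhile (T ++ [l]) = if pvABar l then pvAWhile T else T ++ [l] := by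
  rw [pvAWhile]
  simp

theorem pvBLineStart_spec (tokens : List String) (p : Nat)
    (hp : p = 0 ∨ tokens.getD (p - 1) "" = "<n>") :
    ∀ j, p ≤ j → (∀ m, p ≤ m → m < j → tokens.getD m "" ≠ "<n>") →
    pvBLineStart tokens j = p := by
  intro j
  induction j with
  | zero =>
    intro h _
    have hp0 : p = 0 := by omega
    subst hp0; rfl
  | succ j ih =>
    intro hpj hmid
    simp only [pvBLineStart]
    by_cases hpe : p = j + 1
    · subst hpe
      rcases hp with h | h
      · omega
      · simp at h ⊢; simp [h]
    · have hpl : p ≤ j := by omega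
      rw [if_neg (hmid j hpl (Nat.lt_succ_self j)), ih hpl
        (fun m h1 h2 => hmid m h1 (by omega))]

theorem pvBLineStart_append (xs ys : List String) : ∀ j, j ≤ xs.length →
    pvBLineStart (xs ++ ys) j = pvBLineStart xs j := by
  intro j
  induction j with
  | zero => intro _; rfl
  | succ j ih =>
    intro h
    have : (xs ++ ys).getD j "" = xs.getD j "" := by
      have hj : j < xs.length := by omega
      rw [List.getD_eq_getElem _ _ hj, List.getD_eq_getElem _ _ (by simp; omega),
        List.getElem_append_left hj]
    simp only [pvBLineStart, this]
    split
    · rfl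
    · exact ih (by omega)

theorem pvBLoop_le (tokens : List String) : ∀ cut, pvBLoop tokens cut ≤ cut := by
  intro cut
  induction cut using Nat.strong_induction_on with
  | _ cut ih =>
    match cut with
    | 0 => simp [pvBLoop]
    | cut + 1 =>
      rw [pvBLoop]
      split
      · exact le_trans (le_trans (ih _ (Nat.lt_succ_of_le (pvBLineStart_le tokens cut)))
          (pvBLineStart_le tokens cut)) (by omega)
      · exact le_refl _

theorem pvBLoop_append (xs ys : List String) : ∀ cut, cut ≤ xs.length →
    pvBLoop (xs ++ ys) cut = pvBLoop xs cut := by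
  intro cut
  induction cut using Nat.strong_induction_on with
  | _ cut ih =>
    match cut with
    | 0 => intro _; simp [pvBLoop]
    | cut + 1 =>
      intro h
      rw [pvBLoop, pvBLoop]
      have h1 : pvBLineStart (xs ++ ys) cut = pvBLineStart xs cut :=
        pvBLineStart_append xs ys cut (by omega)
      have h2 : (xs ++ ys).take (cut + 1) = xs.take (cut + 1) :=
        List.take_append_of_le_length h
      rw [h1, h2]
      split
      · exact ih _ (Nat.lt_succ_of_le (pvBLineStart_le xs cut))
          (le_trans (pvBLineStart_le xs cut) (by omega))
      · rfl

theorem pvFlatten_getLast (T : List (List String)) :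
    (∀ l ∈ T, l.getLast? = some "<n>") → T.flatten ≠ [] →
    T.flatten.getLast? = some "<n>" := by
  induction T with
  | nil => intro _ h; simp at h
  | cons l T' ih =>
    intro hall hne
    simp only [List.flatten_cons]
    by_cases hf : T'.flatten = []
    · rw [hf, List.append_nil]
      exact hall l (by simp)
    · rw [List.getLast?_append_of_ne_nil l hf]
      exact ih (fun x hx => hall x (by simp [hx])) hf

theorem pvMain (L : List (List String)) (hG : pvGood L) :
    (pvAWhile L).flatten = L.flatten.take (pvBLoop L.flatten L.flatten.length) := by
  induction L using List.reverseRecOn with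
  | nil => simp [pvAWhile_nil, pvBLoop]
  | append_singleton T last ih =>
    obtain ⟨hlne, hlNoN⟩ := hG.1 last (by simp)
    have hTfull : ∀ l ∈ T, l.getLast? = some "<n>" := by
      have h2 := hG.2
      rw [List.dropLast_concat] at h2
      exact h2
    have hGT : pvGood T := by
      refine ⟨fun l hl => hG.1 l (by simp [hl]), fun l hl => hTfull l (List.dropLast_sublist _ |>.mem hl)⟩
    obtain ⟨k, hk⟩ : ∃ k, last.length = k + 1 :=
      ⟨last.length - 1, by have := List.length_pos_iff.mpr hlne; omega⟩
    have hflat : (T ++ [last]).flatten = T.flatten ++ last := by simp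
    set F := T.flatten with hF
    have hcut : (F ++ last).length = (F.length + k) + 1 := by simp [hk]; omega
    -- the backward inner scan stops exactly at the start of the last line
    have hp : F.length = 0 ∨ (F ++ last).getD (F.length - 1) "" = "<n>" := by
      by_cases hFe : F = []
      · left; simp [hFe]
      · right
        have hlen : 0 < F.length := List.length_pos_iff.mpr hFe
        have h1 : F.length - 1 < F.length := by omega
        rw [List.getD_eq_getElem _ _ (by simp; omega), List.getElem_append_left h1]
        have := pvFlatten_getLast T hTfull hFe
        rw [List.getLast?_eq_getElem? ] at this
        have h2 : F[F.length - 1]? = some F[F.length - 1] := List.getElem?_eq_getElem h1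
        rw [h2] at this
        exact Option.some.inj this
    have hmid : ∀ m, F.length ≤ m → m < F.length + k → (F ++ last).getD m "" ≠ "<n>" := by
      intro m h1 h2
      have hm : m < (F ++ last).length := by omega
      rw [List.getD_eq_getElem _ _ hm]
      rw [List.getElem_append_right h1]
      have hi : m - F.length < last.dropLast.length := by
        rw [List.length_dropLast]; omega
      rw [← List.getElem_dropLast hi]
      exact hlNoN _ (List.getElem_mem hi)
    have hbls : pvBLineStart (F ++ last) (F.length + k) = F.length :=
      pvBLineStart_spec (F ++ last) F.length hp (F.length + k) (by omega) hmid
    have htake : (F ++ last).take ((F.length + k) + 1) = F ++ last := by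
      rw [← hcut, List.take_length]
    rw [hflat, hcut, pvBLoop]
    simp only [hbls, htake, List.drop_left]
    rw [pvAWhile_concat]
    by_cases hbar : pvABar last
    · rw [if_pos hbar, if_pos (by simpa [pvABar, pvAContent] using hbar)]
      rw [ih hGT]
      rw [pvBLoop_append F last F.length (le_refl _)]
      have hle : pvBLoop F F.length ≤ F.length := pvBLoop_le F F.length
      rw [List.take_append_of_le_length hle]
    · rw [if_neg hbar, if_neg (by simpa [pvABar, pvAContent] using hbar)]
      rw [hflat, ← hcut, List.take_length]

-- ===== VERDICT (by name: the statement is the Claim_ definition above) =====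
theorem strip_trailing_double_barlines_py_spec : Claim_equal_strip_trailing_double_barlines_py := by
  intro tokens _
  unfold Spec_strip_trailing_double_barlines_py strip_trailing_double_barlines_py
    strip_trailing_double_barlines_py_alt
  obtain ⟨hG, hf⟩ := pvSplit_good tokens
  rw [pvMain _ hG, hf]
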